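-- pv_equiv track=rewrite | github.com/Daki404/PS | 프로그래머스/2/42860. 조이스틱/조이스틱.py | solution
-- ===== SOURCE A (Python) =====
-- from collections import deque
--
-- def solution(name):
--     def min_horizon_spin():
--         fix_bit = 0
--         for idx, val in enumerate(name):
--             if val != 'A':
--                 fix_bit |= (1<<idx)
--
--         queue = deque([(0, 1, 0)])
--         while queue:
--             now, visit, cnt = queue.popleft()
--
--             if (fix_bit & visit) == fix_bit:
--                 return cnt
--
--             r = (now+1)%len(name)
--             l = (now-1+len(name))%len(name)
--             queue.append((r, visit|(1<<r), cnt+1))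
--             queue.append((l, visit|(1<<l), cnt+1))
--
--     def min_vertical_spin(st, aim):
--         st, aim = min(st, aim), max(st, aim)
--         distance = ord(aim) - ord(st)
--         return min(distance, ord('z')-ord('a')-distance+1)
--
--     ret = sum(min_vertical_spin('A', i) for i in name)
--     ret += min_horizon_spin()
--
--     return ret
-- ===== SOURCE B (Python) =====
-- def solution(name):
--     n = len(name)
--
--     vertical = 0
--     for c in name:
--         d = abs(ord(c) - ord('A'))
--         vertical += min(d, 26 - d)
--
--     req = 0
--     for idx, val in enumerate(name):
--         if val != 'A':
--             req |= (1 << idx)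
--
--     # exact-depth-limited DFS: is there a walk of at most `depth` cursor moves
--     # from `pos` (having already seen `seen`) that covers every required index?
--     def reachable(pos, seen, depth):
--         if (req & seen) == req:
--             return True
--         if depth == 0:
--             return False
--         r = (pos + 1) % n
--         l = (pos + n - 1) % n
--         return reachable(r, seen | (1 << r), depth - 1) or reachable(l, seen | (1 << l), depth - 1)
--
--     # iterative deepening: the answer is the least depth that suffices
--     k = 0
--     while not reachable(0, 1, k):
--         k += 1
--     return vertical + k
-- ===== Notes on version B (the rewrite author's own statement) =====
-- stated objective: alternative
-- what changed: Replaces A's FIFO-queue breadth-first search over (cursor position, visited bitmask) states by an iterative-deepening depth-first search (a recursive exact-depth reachability test inside a shortest-sufficient-depth loop, O(n) memory instead of an exponentially growing queue), and computes the per-letter vertical cost with an absolute-value formula instead of min/max character ordering.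
import Mathlib
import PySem

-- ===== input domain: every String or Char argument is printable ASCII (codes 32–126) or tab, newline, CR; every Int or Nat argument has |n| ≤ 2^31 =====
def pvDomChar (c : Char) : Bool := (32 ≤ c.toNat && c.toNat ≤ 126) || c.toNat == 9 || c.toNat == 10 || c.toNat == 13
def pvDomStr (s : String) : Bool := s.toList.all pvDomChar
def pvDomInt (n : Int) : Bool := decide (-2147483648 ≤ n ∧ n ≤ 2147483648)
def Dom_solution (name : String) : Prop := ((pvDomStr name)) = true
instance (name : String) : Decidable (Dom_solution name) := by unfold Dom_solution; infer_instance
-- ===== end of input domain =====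

-- B replaces A's FIFO-queue breadth-first search over (position, visited-bitmask) states by an
-- iterative-deepening depth-first reachability test (objective: alternative; not measurably faster).

-- ===== PORT A =====

-- `for idx, val in enumerate(name): if val != 'A': fix_bit |= 1 << idx` (hand port; exact: idx = 0,1,…)
def pvFix (cs : List Char) : Nat :=
  cs.zipIdx.foldl (fun fb p => if p.1 ≠ 'A' then fb ||| (1 <<< p.2) else fb) 0

-- the `while queue:` BFS loop; state = (now, visit, cnt); the deque is ported as the standard
-- two-list functional queue (pop from `front`, push on `back` which is kept reversed) so that
-- popleft/append stay O(1) as in Python; fuel only makes the recursion structural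
-- (2^(len+1) pops are proved sufficient below, so the `.getD 0` default is never used);
-- `(now-1+len)%len` is ported as `(now+len-1)%len`, the same value since now ≥ 0.
def pvBfs (n fix : Nat) : Nat → List (Nat × Nat × Nat) → List (Nat × Nat × Nat) → Option Nat
  | 0, _, _ => none
  | fuel + 1, (now, visit, cnt) :: front, back =>
    if fix &&& visit == fix then some cnt
    else
      let r := (now + 1) % n
      let l := (now + n - 1) % n
      pvBfs n fix fuel front
        ((l, visit ||| (1 <<< l), cnt + 1) :: (r, visit ||| (1 <<< r), cnt + 1) :: back)
  | fuel + 1, [], back =>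
    match back.reverse with
    | [] => none
    | (now, visit, cnt) :: front =>
      if fix &&& visit == fix then some cnt
      else
        let r := (now + 1) % n
        let l := (now + n - 1) % n
        pvBfs n fix fuel front
          [(l, visit ||| (1 <<< l), cnt + 1), (r, visit ||| (1 <<< r), cnt + 1)]

-- min_vertical_spin('A', c): Python's min/max on one-char strings compare code points
def pvVertA (c : Char) : Int :=
  let st : Int := if c.toNat < 65 then (c.toNat : Int) else 65
  let aim : Int := if 65 < c.toNat then (c.toNat : Int) else 65
  let distance := aim - st
  min distance (122 - 97 - distance + 1)

def solution (name : String) : Int :=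
  let cs := name.toList
  let ret := (cs.map pvVertA).sum
  let fix := pvFix cs
  ret + ((pvBfs cs.length fix (2 ^ (cs.length + 1)) [(0, 1, 0)] []).getD 0 : Nat)

-- ===== PORT B =====

-- `d = abs(ord(c) - ord('A')); min(d, 26 - d)`
def pvVertB (c : Char) : Int :=
  let d : Int := |(c.toNat : Int) - 65|
  min d (26 - d)

-- `for idx, val in enumerate(name): if val != 'A': req |= 1 << idx` (same loop as in Source B)
def pvReq (cs : List Char) : Nat :=
  cs.zipIdx.foldl (fun fb p => if p.1 ≠ 'A' then fb ||| (1 <<< p.2) else fb) 0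

-- `reachable(pos, seen, depth)`: exact-depth-limited DFS
def pvReach (n req : Nat) : Nat → Nat → Nat → Bool
  | _, seen, 0 => req &&& seen == req
  | pos, seen, depth + 1 =>
    if req &&& seen == req then true
    else
      let r := (pos + 1) % n
      let l := (pos + n - 1) % n
      pvReach n req r (seen ||| (1 <<< r)) depth || pvReach n req l (seen ||| (1 <<< l)) depth

-- `k = 0; while not reachable(0, 1, k): k += 1`; fuel n+1 makes it structural
-- (depth n always suffices, proved below, so the fuel-0 fallback is never used)
def pvFindK (n req : Nat) : Nat → Nat → Nat
  | 0, k => k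
  | fuel + 1, k => if pvReach n req 0 1 k then k else pvFindK n req fuel (k + 1)

def solution_alt (name : String) : Int :=
  let cs := name.toList
  let n := cs.length
  let vertical := cs.foldl (fun acc c => acc + pvVertB c) (0 : Int)
  let req := pvReq cs
  vertical + (pvFindK n req (n + 1) 0 : Nat)

-- ===== PRECONDITION & SPEC =====
def Spec_solution (name : String) (out : Int) : Prop := out = solution_alt name
instance (name : String) (out : Int) : Decidable (Spec_solution name out) := by unfold Spec_solution; infer_instance

-- ===== CLAIM (what is proved, stated in full; the proofs are below) =====
def Claim_equal_solution : Prop := ∀ (name : String), Dom_solution name → Spec_solution name (solution name)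

-- ===== LEMMAS AND PROOFS =====

-- proof-side model of the BFS: the whole queue as one list (front ++ reverse back)
def pvBfsQ (n fix : Nat) : Nat → List (Nat × Nat × Nat) → Option Nat
  | 0, _ => none
  | _ + 1, [] => none
  | fuel + 1, (now, visit, cnt) :: q =>
    if fix &&& visit == fix then some cnt
    else
      let r := (now + 1) % n
      let l := (now + n - 1) % n
      pvBfsQ n fix fuel (q ++ [(r, visit ||| (1 <<< r), cnt + 1), (l, visit ||| (1 <<< l), cnt + 1)])

theorem pvBfs_eq_q (n fix : Nat) : ∀ fuel front back,
    pvBfs n fix fuel front back = pvBfsQ n fix fuel (front ++ back.reverse) := by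
  intro fuel
  induction fuel with
  | zero => intro front back; rfl
  | succ fuel ih =>
    intro front back
    cases front with
    | cons s f =>
      obtain ⟨now, visit, cnt⟩ := s
      show (if fix &&& visit == fix then some cnt else _) = _
      rw [show ((now, visit, cnt) :: f) ++ back.reverse = (now, visit, cnt) :: (f ++ back.reverse)
        from rfl]
      show _ = (if fix &&& visit == fix then some cnt else _)
      by_cases hg : (fix &&& visit == fix) = true
      · simp only [hg, if_true]
      · simp only [hg, Bool.false_eq_true, if_false]
        rw [ih]
        simp [List.append_assoc]
    | nil =>
      show (match back.reverse with
        | [] => none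
        | (now, visit, cnt) :: front => _) = pvBfsQ n fix (fuel + 1) ([] ++ back.reverse)
      cases hb : back.reverse with
      | nil => rfl
      | cons s f =>
        obtain ⟨now, visit, cnt⟩ := s
        show (if fix &&& visit == fix then some cnt else _) = _
        by_cases hg : (fix &&& visit == fix) = true
        · simp [pvBfsQ, hg]
        · simp only [hg, Bool.false_eq_true, if_false, List.nil_append]
          rw [ih]
          simp [pvBfsQ, hg]

-- right / left child of a BFS state, and one BFS expansion layer
def pvRC (n : Nat) (s : Nat × Nat × Nat) : Nat × Nat × Nat :=
  ((s.1 + 1) % n, s.2.1 ||| (1 <<< ((s.1 + 1) % n)), s.2.2 + 1)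
def pvLC (n : Nat) (s : Nat × Nat × Nat) : Nat × Nat × Nat :=
  ((s.1 + n - 1) % n, s.2.1 ||| (1 <<< ((s.1 + n - 1) % n)), s.2.2 + 1)
def pvExpand (n : Nat) (l : List (Nat × Nat × Nat)) : List (Nat × Nat × Nat) :=
  l.flatMap (fun s => [pvRC n s, pvLC n s])
def pvExpandIter (n : Nat) : Nat → List (Nat × Nat × Nat) → List (Nat × Nat × Nat)
  | 0, l => l
  | k + 1, l => pvExpandIter n k (pvExpand n l)
def pvGoalOf (fix : Nat) (s : Nat × Nat × Nat) : Bool := fix &&& s.2.1 == fix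
-- "some walk of exactly k further moves from s ends in a goal state"
def pvExact (n fix : Nat) : (Nat × Nat × Nat) → Nat → Bool
  | s, 0 => pvGoalOf fix s
  | s, k + 1 => pvExact n fix (pvRC n s) k || pvExact n fix (pvLC n s) k

theorem pvBfsQ_cons (n fix fuel : Nat) (s : Nat × Nat × Nat) (q : List (Nat × Nat × Nat)) :
    pvBfsQ n fix (fuel + 1) (s :: q) =
      if pvGoalOf fix s then some s.2.2 else pvBfsQ n fix fuel (q ++ [pvRC n s, pvLC n s]) := by
  obtain ⟨a, b, c⟩ := s
  rfl

theorem pvBfsQ_mono (n fix : Nat) : ∀ fuel fuel' (q : List (Nat × Nat × Nat)) (v : Nat),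
    pvBfsQ n fix fuel q = some v → fuel ≤ fuel' → pvBfsQ n fix fuel' q = some v := by
  intro fuel
  induction fuel with
  | zero => intro _ _ _ h; simp [pvBfsQ] at h
  | succ f ih =>
    intro fuel' q v h hle
    obtain ⟨f', rfl⟩ : ∃ f', fuel' = f' + 1 := ⟨fuel' - 1, by omega⟩
    cases q with
    | nil => simp [pvBfsQ] at h
    | cons s q =>
      rw [pvBfsQ_cons] at h ⊢
      by_cases hg : pvGoalOf fix s
      · simpa [hg] using h
      · simp only [hg] at h ⊢
        exact ih f' _ v (by simpa [hg] using h) (by omega)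

theorem pvBfsQ_skip (n fix : Nat) : ∀ (L M : List (Nat × Nat × Nat)) fuel,
    (∀ s ∈ L, pvGoalOf fix s = false) →
    pvBfsQ n fix (fuel + L.length) (L ++ M) = pvBfsQ n fix fuel (M ++ pvExpand n L) := by
  intro L
  induction L with
  | nil => intro M fuel _; simp [pvExpand]
  | cons s L ih =>
    intro M fuel hng
    have hs : pvGoalOf fix s = false := hng s (by simp)
    have : fuel + (s :: L).length = (fuel + L.length) + 1 := by simp; omega
    rw [this, show (s :: L) ++ M = s :: (L ++ M) from rfl, pvBfsQ_cons, hs]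
    simp only [Bool.false_eq_true, if_false, List.append_assoc]
    rw [ih (M ++ [pvRC n s, pvLC n s]) fuel (fun x hx => hng x (by simp [hx]))]
    simp [pvExpand, List.append_assoc]

theorem pvExpandIter_succ (n : Nat) : ∀ k l,
    pvExpandIter n (k + 1) l = pvExpand n (pvExpandIter n k l) := by
  intro k
  induction k with
  | zero => intro l; rfl
  | succ k ih => intro l; exact ih (pvExpand n l)

theorem pvExpand_length (n : Nat) (l : List (Nat × Nat × Nat)) :
    (pvExpand n l).length = 2 * l.length := by
  induction l with
  | nil => rfl
  | cons s l ih => simp [pvExpand] at ih ⊢; omega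

theorem pvExpandIter_length (n : Nat) : ∀ k l,
    (pvExpandIter n k l).length = l.length * 2 ^ k := by
  intro k
  induction k with
  | zero => intro l; simp [pvExpandIter]
  | succ k ih =>
    intro l
    rw [pvExpandIter_succ, pvExpand_length, ih, Nat.pow_succ]
    ring

theorem pvExpandIter_cnt (n : Nat) : ∀ k l (c : Nat),
    (∀ s' ∈ l, (s' : Nat × Nat × Nat).2.2 = c) →
    ∀ s ∈ pvExpandIter n k l, (s : Nat × Nat × Nat).2.2 = c + k := by
  intro k
  induction k with
  | zero => intro l c h s hs; simpa using h s hs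
  | succ k ih =>
    intro l c h s hs
    rw [pvExpandIter_succ] at hs
    simp only [pvExpand, List.mem_flatMap] at hs
    obtain ⟨t, ht, hst⟩ := hs
    have hc := ih l c h t ht
    simp only [List.mem_cons, List.not_mem_nil, or_false] at hst
    have : s.2.2 = c + k + 1 := by
      rcases hst with h1 | h1
      · rw [h1]; simp [pvRC, hc]
      · rw [h1]; simp [pvLC, hc]
    omega

theorem pvGoalOf_or (fix v b : Nat) (h : (fix &&& v == fix) = true) :
    (fix &&& (v ||| b) == fix) = true := by
  simp only [beq_iff_eq] at h ⊢
  apply Nat.eq_of_testBit_eq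
  intro i
  have hi := congrArg (fun x => Nat.testBit x i) h
  simp only [Nat.testBit_land] at hi
  simp only [Nat.testBit_land, Nat.testBit_lor]
  cases hf : Nat.testBit fix i
  · simp
  · simp [hf] at hi ⊢
    simp [hi]

theorem pvExact_of_goal (n fix : Nat) : ∀ k s, pvGoalOf fix s = true → pvExact n fix s k = true := by
  intro k
  induction k with
  | zero => intro s h; simpa [pvExact] using h
  | succ k ih =>
    intro s h
    have : pvGoalOf fix (pvRC n s) = true := pvGoalOf_or fix s.2.1 _ h
    simp [pvExact, ih _ this]

theorem pvAny_expandIter (n fix : Nat) : ∀ k l,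
    ((pvExpandIter n k l).any (pvGoalOf fix)) = l.any (fun s => pvExact n fix s k) := by
  intro k
  induction k with
  | zero => intro l; rfl
  | succ k ih =>
    intro l
    show (pvExpandIter n k (pvExpand n l)).any _ = _
    rw [ih (pvExpand n l)]
    simp [pvExpand, List.any_flatMap, pvExact]

theorem pvExact_eq_reach (n req : Nat) : ∀ k p v c,
    pvExact n req (p, v, c) k = pvReach n req p v k := by
  intro k
  induction k with
  | zero => intro p v c; rfl
  | succ k ih =>
    intro p v c
    by_cases hg : (req &&& v == req) = true
    · have hr : pvExact n req (pvRC n (p, v, c)) k = true :=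
        pvExact_of_goal n req k _ (pvGoalOf_or req v _ hg)
      simp [pvExact, pvReach, hg, hr]
    · simp only [pvExact, pvReach, hg, if_false, Bool.false_eq_true]
      rw [ih, ih]
      rfl

theorem pvReach_of_cover (n req : Nat) : ∀ d p v,
    (∀ i, req.testBit i = true →
      (v.testBit i = true ∨ ∃ t, 1 ≤ t ∧ t ≤ d ∧ (p + t) % n = i)) →
    pvReach n req p v d = true := by
  intro d
  induction d with
  | zero =>
    intro p v h
    simp only [pvReach, beq_iff_eq]
    apply Nat.eq_of_testBit_eq
    intro i
    simp only [Nat.testBit_land]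
    cases hr : Nat.testBit req i
    · simp
    · rcases h i hr with hv | ⟨t, h1, h2, _⟩
      · simp [hv]
      · omega
  | succ d ih =>
    intro p v h
    by_cases hg : (req &&& v == req) = true
    · simp [pvReach, hg]
    · simp only [pvReach, hg, if_false, Bool.false_eq_true, Bool.or_eq_true]
      left
      apply ih
      intro i hr
      rcases h i hr with hv | ⟨t, h1, h2, h3⟩
      · left; simp [hv]
      · by_cases ht : t = 1
        · left
          subst ht
          rw [← h3]
          simp [Nat.one_shiftLeft, Nat.testBit_two_pow_self]
        · right
          refine ⟨t - 1, by omega, by omega, ?_⟩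
          rw [Nat.mod_add_mod, ← h3]
          congr 1
          omega

theorem pvFold_lt (n : Nat) : ∀ (l : List (Char × Nat)) (acc : Nat),
    (∀ p ∈ l, (p : Char × Nat).2 < n) → acc < 2 ^ n →
    l.foldl (fun fb p => if p.1 ≠ 'A' then fb ||| (1 <<< p.2) else fb) acc < 2 ^ n := by
  intro l
  induction l with
  | nil => intro acc _ h; simpa using h
  | cons p l ih =>
    intro acc hmem hacc
    apply ih
    · intro q hq; exact hmem q (by simp [hq])
    · show (if p.1 ≠ 'A' then acc ||| 1 <<< p.2 else acc) < 2 ^ n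
      by_cases hp : p.1 ≠ 'A'
      · rw [if_pos hp]
        apply Nat.or_lt_two_pow hacc
        rw [Nat.one_shiftLeft]
        exact Nat.pow_lt_pow_right (by norm_num) (hmem p (by simp))
      · rw [if_neg hp]; exact hacc

theorem pvReq_lt (cs : List Char) : pvReq cs < 2 ^ cs.length := by
  unfold pvReq
  apply pvFold_lt
  · intro p hp
    exact List.snd_lt_of_mem_zipIdx hp
  · exact Nat.two_pow_pos _

theorem pvReach_full (cs : List Char) : pvReach cs.length (pvReq cs) 0 1 cs.length = true := by
  apply pvReach_of_cover
  intro i hr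
  have hlt : i < cs.length := by
    by_contra hge
    have : pvReq cs < 2 ^ i :=
      lt_of_lt_of_le (pvReq_lt cs) (Nat.pow_le_pow_right (by norm_num) (by omega))
    simp [Nat.testBit_lt_two_pow this] at hr
  right
  by_cases hi : i = 0
  · exact ⟨cs.length, by omega, le_rfl, by simp [hi]⟩
  · exact ⟨i, by omega, by omega, by simpa using Nat.mod_eq_of_lt hlt⟩

theorem pvFindK_spec (n req : Nat) : ∀ fuel k,
    pvReach n req 0 1 (k + fuel) = true →
    pvReach n req 0 1 (pvFindK n req (fuel + 1) k) = true ∧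
      ∀ j, k ≤ j → j < pvFindK n req (fuel + 1) k → pvReach n req 0 1 j = false := by
  intro fuel
  induction fuel with
  | zero =>
    intro k h
    have hk : pvReach n req 0 1 k = true := by simpa using h
    have he : pvFindK n req (0 + 1) k = k := by simp [pvFindK, hk]
    rw [he]
    exact ⟨hk, fun j h1 h2 => by omega⟩
  | succ f ih =>
    intro k h
    by_cases hk : pvReach n req 0 1 k = true
    · have he : pvFindK n req (f + 1 + 1) k = k := by simp [pvFindK, hk]
      rw [he]
      exact ⟨hk, fun j h1 h2 => by omega⟩
    · have hrec := ih (k + 1) (by rw [show k + 1 + f = k + (f + 1) from by omega]; exact h)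
      have he : pvFindK n req (f + 1 + 1) k = pvFindK n req (f + 1) (k + 1) := by
        simp [pvFindK, hk]
      rw [he]
      refine ⟨hrec.1, fun j h1 h2 => ?_⟩
      rcases Nat.eq_or_lt_of_le h1 with rfl | hlt
      · simpa using hk
      · exact hrec.2 j (by omega) h2

theorem pvFirst_split {α : Type} (p : α → Bool) : ∀ (l : List α), l.any p = true →
    ∃ l1 a l2, l = l1 ++ a :: l2 ∧ p a = true ∧ ∀ x ∈ l1, p x = false := by
  intro l
  induction l with
  | nil => intro h; simp at h
  | cons x l ih =>
    intro h
    by_cases hx : p x = true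
    · exact ⟨[], x, l, by simp, hx, by simp⟩
    · have hl : l.any p = true := by
        rcases List.any_eq_true.mp h with ⟨y, hy, hpy⟩
        rcases List.mem_cons.mp hy with rfl | hy'
        · exact absurd hpy hx
        · exact List.any_eq_true.mpr ⟨y, hy', hpy⟩
      obtain ⟨l1, a, l2, rfl, ha, hl1⟩ := ih hl
      refine ⟨x :: l1, a, l2, rfl, ha, ?_⟩
      intro z hz
      rcases List.mem_cons.mp hz with rfl | hz'
      · simpa using hx
      · exact hl1 z hz'

theorem pvChain (n fix : Nat) : ∀ k fuel,
    (∀ j, j < k → ∀ s ∈ pvExpandIter n j [(0, 1, 0)], pvGoalOf fix s = false) →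
    pvBfsQ n fix (fuel + (2 ^ k - 1)) [(0, 1, 0)] =
      pvBfsQ n fix fuel (pvExpandIter n k [(0, 1, 0)]) := by
  intro k
  induction k with
  | zero => intro fuel _; rfl
  | succ k ih =>
    intro fuel h
    have h2 : 1 ≤ 2 ^ k := Nat.one_le_two_pow
    rw [show fuel + (2 ^ (k + 1) - 1) = (fuel + 2 ^ k) + (2 ^ k - 1) from by
      rw [Nat.pow_succ]; omega]
    rw [ih (fuel + 2 ^ k) (fun j hj => h j (by omega))]
    have hlen : 2 ^ k = (pvExpandIter n k [(0, 1, 0)]).length := by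
      rw [pvExpandIter_length]; simp
    rw [show fuel + 2 ^ k = fuel + (pvExpandIter n k [(0, 1, 0)]).length from by rw [← hlen]]
    have := pvBfsQ_skip n fix (pvExpandIter n k [(0, 1, 0)]) [] fuel
      (h k (by omega))
    rw [List.append_nil] at this
    rw [this, pvExpandIter_succ]
    rfl

theorem pvVert_eq (c : Char) : pvVertA c = pvVertB c := by
  unfold pvVertA pvVertB
  rcases abs_cases ((c.toNat : Int) - 65) with ⟨h1, h2⟩ | ⟨h1, h2⟩ <;>
    split_ifs <;> simp [min_def] <;> split_ifs <;> push_cast at * <;> omega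

theorem pvSum_eq (cs : List Char) : ∀ acc : Int,
    cs.foldl (fun acc c => acc + pvVertB c) acc = acc + (cs.map pvVertA).sum := by
  induction cs with
  | nil => intro acc; simp
  | cons c cs ih => intro acc; simp [ih, pvVert_eq c]; ring

-- main horizontal lemma: the BFS with fuel 2^(n+1) returns exactly B's iterative-deepening answer
theorem pvBfsQ_eq_findK (cs : List Char) :
    pvBfsQ cs.length (pvFix cs) (2 ^ (cs.length + 1)) [(0, 1, 0)] =
      some (pvFindK cs.length (pvReq cs) (cs.length + 1) 0) := by
  have hfr : pvFix cs = pvReq cs := rfl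
  set n := cs.length
  set req := pvReq cs
  -- B's answer k0: least depth from which goal is reachable
  have hfull : pvReach n req 0 1 (0 + n) = true := by simpa using pvReach_full cs
  obtain ⟨hk0, hmin⟩ := pvFindK_spec n req n 0 hfull
  set k0 := pvFindK n req (n + 1) 0 with hk0def
  have hk0n : k0 ≤ n := by
    by_contra hgt
    have hmn := hmin n (by omega) (by omega)
    rw [Nat.zero_add, hmn] at hfull
    simp at hfull
  -- translate reachability into "level k has a goal state"
  have hany : ∀ j, ((pvExpandIter n j [(0, 1, 0)]).any (pvGoalOf req)) = pvReach n req 0 1 j := by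
    intro j
    rw [pvAny_expandIter]
    simp [pvExact_eq_reach]
  obtain ⟨l1, g, l2, hsplit, hg, hl1⟩ :=
    pvFirst_split (pvGoalOf req) (pvExpandIter n k0 [(0, 1, 0)]) (by rw [hany]; exact hk0)
  have hgcnt : g.2.2 = k0 := by
    have := pvExpandIter_cnt n k0 [(0, 1, 0)] 0 (by simp) g (by rw [hsplit]; simp)
    omega
  -- exact-fuel run: skip the goal-free levels, then the goal-free prefix of level k0, then hit g
  have hrun : pvBfsQ n req ((1 + l1.length) + (2 ^ k0 - 1)) [(0, 1, 0)] = some k0 := by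
    rw [pvChain n req k0 (1 + l1.length) (fun j hj s hs => by
      have hj' := hany j
      rw [hmin j (by omega) hj] at hj'
      exact Bool.eq_false_iff.mpr (List.any_eq_false.mp hj' s hs))]
    rw [hsplit]
    rw [show (1 : Nat) + l1.length = 1 + l1.length from rfl, pvBfsQ_skip n req l1 (g :: l2) 1 hl1]
    rw [show (g :: l2) ++ pvExpand n l1 = g :: (l2 ++ pvExpand n l1) from rfl]
    rw [pvBfsQ_cons, if_pos hg, hgcnt]
  -- the stated fuel is at least the exact fuel
  have hl1len : l1.length < 2 ^ k0 := by
    have := pvExpandIter_length n k0 [(0, 1, 0)]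
    rw [hsplit] at this
    simp at this
    omega
  have hfuel : (1 + l1.length) + (2 ^ k0 - 1) ≤ 2 ^ (n + 1) := by
    have h1 : 2 ^ (k0 + 1) ≤ 2 ^ (n + 1) := Nat.pow_le_pow_right (by norm_num) (by omega)
    have h2 : 2 ^ (k0 + 1) = 2 * 2 ^ k0 := by rw [Nat.pow_succ]; ring
    have h3 : 1 ≤ 2 ^ k0 := Nat.one_le_two_pow
    omega
  rw [hfr]
  exact pvBfsQ_mono n req _ _ _ _ hrun hfuel

-- ===== VERDICT (by name: the statement is the Claim_ definition above) =====
theorem solution_spec : Claim_equal_solution := by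
  intro name _
  unfold Spec_solution solution solution_alt
  simp only []
  rw [pvBfs_eq_q]
  simp only [List.reverse_nil, List.append_nil]
  rw [pvBfsQ_eq_findK name.toList, pvSum_eq name.toList 0]
  simp
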